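-- pv_equiv track=rewrite | github.com/laflucETH/BADASP | src/badasp_core.py | _filter_pairs_by_reconciliation
-- ===== SOURCE A (Python) =====
-- from typing import Dict, List, Optional, Sequence, Tuple
--
-- def _filter_pairs_by_reconciliation(
--     pairs: List[Tuple[int, int]],
--     level_lcas: Dict[int, str],
--     reconciliation_events: Dict[str, str],
-- ) -> Tuple[List[Tuple[int, int]], int, int]:
--     if not reconciliation_events:
--         return pairs, 0, 0
--
--     lca_values = set(level_lcas.values())
--     recon_keys = set(reconciliation_events.keys())
--     matching_nodes = lca_values & recon_keys
--     if not matching_nodes: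
--         raise ValueError(
--             f"No reconciliation node names matched ASR LCA nodes. ASR sample: {sorted(lca_values)[:3]}, "
--             f"Reconciliation sample: {sorted(recon_keys)[:3]}"
--         )
--         return pairs, 0, 0
--
--     kept_pairs: List[Tuple[int, int]] = []
--     skipped_pairs = 0
--     skipped_speciation_pairs = 0
--     for cluster_a, cluster_b in pairs:
--         lca_a = level_lcas[cluster_a]
--         lca_b = level_lcas[cluster_b]
--         event_a = reconciliation_events.get(lca_a, "Duplication")
--         event_b = reconciliation_events.get(lca_b, "Duplication")
--         if event_a != "Duplication" or event_b != "Duplication":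
--             skipped_pairs += 1
--             if event_a == "Speciation" or event_b == "Speciation":
--                 skipped_speciation_pairs += 1
--             continue
--         kept_pairs.append((cluster_a, cluster_b))
--     return kept_pairs, skipped_pairs, skipped_speciation_pairs
-- ===== SOURCE B (Python) =====
-- from typing import Dict, List, Tuple
--
-- def _filter_pairs_by_reconciliation(
--     pairs: List[Tuple[int, int]],
--     level_lcas: Dict[int, str],
--     reconciliation_events: Dict[str, str],
-- ) -> Tuple[List[Tuple[int, int]], int, int]:
--     if not reconciliation_events:
--         return pairs, 0, 0
--
--     lca_values = set(level_lcas.values())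
--     recon_keys = set(reconciliation_events.keys())
--     matching_nodes = lca_values & recon_keys
--     if not matching_nodes:
--         raise ValueError(
--             f"No reconciliation node names matched ASR LCA nodes. ASR sample: {sorted(lca_values)[:3]}, "
--             f"Reconciliation sample: {sorted(recon_keys)[:3]}"
--         )
--
--     def event(cluster: int) -> str:
--         return reconciliation_events.get(level_lcas[cluster], "Duplication")
--
--     kept_pairs = [
--         (a, b)
--         for a, b in pairs
--         if event(a) == "Duplication" and event(b) == "Duplication"
--     ]
--     skipped_pairs = len(pairs) - len(kept_pairs)
--     skipped_speciation_pairs = sum(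
--         1 for a, b in pairs if event(a) == "Speciation" or event(b) == "Speciation"
--     )
--     return kept_pairs, skipped_pairs, skipped_speciation_pairs
-- ===== Notes on version B (the rewrite author's own statement) =====
-- stated objective: alternative
-- what changed: The fused accumulator loop (kept list + two mutable counters updated with continue) is replaced by three independent aggregations: a comprehension for kept_pairs, skipped_pairs as len(pairs) - len(kept_pairs), and a generator-sum counting speciation pairs.
import Mathlib
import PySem

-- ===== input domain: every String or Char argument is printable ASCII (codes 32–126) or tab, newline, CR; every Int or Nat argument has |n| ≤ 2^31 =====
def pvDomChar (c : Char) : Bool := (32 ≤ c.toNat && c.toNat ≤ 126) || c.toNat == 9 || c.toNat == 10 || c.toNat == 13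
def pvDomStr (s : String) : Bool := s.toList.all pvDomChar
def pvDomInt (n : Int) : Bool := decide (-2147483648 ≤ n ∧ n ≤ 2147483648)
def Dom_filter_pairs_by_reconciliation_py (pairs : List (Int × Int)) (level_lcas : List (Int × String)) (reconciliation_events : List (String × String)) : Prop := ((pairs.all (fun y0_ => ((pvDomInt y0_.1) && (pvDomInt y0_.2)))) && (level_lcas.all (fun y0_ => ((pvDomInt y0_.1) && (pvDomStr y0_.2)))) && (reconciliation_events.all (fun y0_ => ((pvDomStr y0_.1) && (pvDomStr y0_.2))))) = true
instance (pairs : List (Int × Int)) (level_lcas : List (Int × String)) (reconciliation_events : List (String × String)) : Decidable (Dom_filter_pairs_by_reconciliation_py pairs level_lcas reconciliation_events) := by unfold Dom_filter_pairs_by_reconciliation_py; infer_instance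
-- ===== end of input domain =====

-- ===== PORT A =====
-- B changes only the third stage: A's fused accumulator loop becomes three independent aggregations (alternative decomposition, same cost).
-- dict lookup = first match on the association list (the convention's dict model)
def pvLookupInt (d : List (Int × String)) (k : Int) : Option String :=
  List.lookup k d

def pvLookupStr (d : List (String × String)) (k : String) : Option String :=
  List.lookup k d

-- the loop body of A, one step of the fold over (kept_pairs, skipped_pairs, skipped_speciation_pairs)
def pvStepA (level_lcas : List (Int × String)) (reconciliation_events : List (String × String))
    (acc : List (Int × Int) × Int × Int) (p : Int × Int) : List (Int × Int) × Int × Int :=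
  let lca_a := (pvLookupInt level_lcas p.1).getD ""          -- total form of level_lcas[cluster_a]; KeyError excluded by Pre_
  let lca_b := (pvLookupInt level_lcas p.2).getD ""
  let event_a := (pvLookupStr reconciliation_events lca_a).getD "Duplication"
  let event_b := (pvLookupStr reconciliation_events lca_b).getD "Duplication"
  if event_a ≠ "Duplication" ∨ event_b ≠ "Duplication" then
    (acc.1, acc.2.1 + 1, if event_a = "Speciation" ∨ event_b = "Speciation" then acc.2.2 + 1 else acc.2.2)
  else
    (acc.1 ++ [p], acc.2.1, acc.2.2)

def filter_pairs_by_reconciliation_py (pairs : List (Int × Int)) (level_lcas : List (Int × String)) (reconciliation_events : List (String × String)) : (List (Int × Int)) × Int × Int :=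
  if reconciliation_events = [] then (pairs, 0, 0)
  else
    let lca_values := PySem.Set.ofList (level_lcas.map Prod.snd)
    let recon_keys := PySem.Set.ofList (reconciliation_events.map Prod.fst)
    let matching_nodes := PySem.Set.inter lca_values recon_keys
    if matching_nodes = [] then ([], 0, 0)                   -- Python raises ValueError here; excluded by Pre_
    else
      pairs.foldl (pvStepA level_lcas reconciliation_events) ([], 0, 0)

-- ===== PORT B =====
-- event(cluster) of Source B
def pvEventB (level_lcas : List (Int × String)) (reconciliation_events : List (String × String)) (cluster : Int) : String :=
  (List.lookup ((List.lookup cluster level_lcas).getD "") reconciliation_events).getD "Duplication"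

def filter_pairs_by_reconciliation_py_alt (pairs : List (Int × Int)) (level_lcas : List (Int × String)) (reconciliation_events : List (String × String)) : (List (Int × Int)) × Int × Int :=
  if reconciliation_events = [] then (pairs, 0, 0)
  else
    let lca_values := PySem.Set.ofList (level_lcas.map Prod.snd)
    let recon_keys := PySem.Set.ofList (reconciliation_events.map Prod.fst)
    let matching_nodes := PySem.Set.inter lca_values recon_keys
    if matching_nodes = [] then ([], 0, 0)                   -- Python raises ValueError here; excluded by Pre_
    else
      let ev := pvEventB level_lcas reconciliation_events
      let kept_pairs := pairs.filter (fun p => ev p.1 == "Duplication" && ev p.2 == "Duplication")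
      let skipped_pairs : Int := (pairs.length : Int) - (kept_pairs.length : Int)
      let skipped_speciation_pairs : Int :=
        (pairs.countP (fun p => ev p.1 == "Speciation" || ev p.2 == "Speciation") : Int)
      (kept_pairs, skipped_pairs, skipped_speciation_pairs)

-- ===== PRECONDITION & SPEC =====
-- Pre_ excludes exactly the inputs on which A raises: the ValueError when a nonempty
-- reconciliation_events shares no node name with level_lcas' values, and the KeyError when a
-- pair's cluster id is missing from level_lcas (only reachable with nonempty reconciliation_events).
def Pre_filter_pairs_by_reconciliation_py (pairs : List (Int × Int)) (level_lcas : List (Int × String)) (reconciliation_events : List (String × String)) : Prop :=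
  reconciliation_events = [] ∨
    ((∃ kv ∈ level_lcas, kv.2 ∈ reconciliation_events.map Prod.fst) ∧
     ∀ p ∈ pairs, p.1 ∈ level_lcas.map Prod.fst ∧ p.2 ∈ level_lcas.map Prod.fst)
instance (pairs : List (Int × Int)) (level_lcas : List (Int × String)) (reconciliation_events : List (String × String)) : Decidable (Pre_filter_pairs_by_reconciliation_py pairs level_lcas reconciliation_events) := by unfold Pre_filter_pairs_by_reconciliation_py; infer_instance

def pvWitness_filter_pairs_by_reconciliation_py : (List (Int × Int)) × (List (Int × String)) × (List (String × String)) :=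
  ([(1, 2)], [(1, "n1"), (2, "n2")], [("n1", "Speciation"), ("n2", "Duplication")])

def Spec_filter_pairs_by_reconciliation_py (pairs : List (Int × Int)) (level_lcas : List (Int × String)) (reconciliation_events : List (String × String)) (out : (List (Int × Int)) × Int × Int) : Prop := out = filter_pairs_by_reconciliation_py_alt pairs level_lcas reconciliation_events
instance (pairs : List (Int × Int)) (level_lcas : List (Int × String)) (reconciliation_events : List (String × String)) (out : (List (Int × Int)) × Int × Int) : Decidable (Spec_filter_pairs_by_reconciliation_py pairs level_lcas reconciliation_events out) := by unfold Spec_filter_pairs_by_reconciliation_py; infer_instance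

-- ===== CLAIM (what is proved, stated in full; the proofs are below) =====
def Claim_equal_filter_pairs_by_reconciliation_py : Prop := ∀ (pairs : List (Int × Int)) (level_lcas : List (Int × String)) (reconciliation_events : List (String × String)), Dom_filter_pairs_by_reconciliation_py pairs level_lcas reconciliation_events → Pre_filter_pairs_by_reconciliation_py pairs level_lcas reconciliation_events → Spec_filter_pairs_by_reconciliation_py pairs level_lcas reconciliation_events (filter_pairs_by_reconciliation_py pairs level_lcas reconciliation_events)

-- ===== LEMMAS AND PROOFS =====

-- A's fold, run from any accumulator, equals B's three aggregations added onto it.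
theorem pvLoopA_eq (level_lcas : List (Int × String)) (reconciliation_events : List (String × String))
    (pairs : List (Int × Int)) (k : List (Int × Int)) (s sp : Int) :
    pairs.foldl (pvStepA level_lcas reconciliation_events) (k, s, sp) =
      (k ++ pairs.filter (fun p => pvEventB level_lcas reconciliation_events p.1 == "Duplication" &&
                                   pvEventB level_lcas reconciliation_events p.2 == "Duplication"),
       s + ((pairs.length : Int) -
            ((pairs.filter (fun p => pvEventB level_lcas reconciliation_events p.1 == "Duplication" &&
                                     pvEventB level_lcas reconciliation_events p.2 == "Duplication")).length : Int)),
       sp + (pairs.countP (fun p => pvEventB level_lcas reconciliation_events p.1 == "Speciation" ||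
                                    pvEventB level_lcas reconciliation_events p.2 == "Speciation") : Int)) := by
  induction pairs generalizing k s sp with
  | nil => simp
  | cons p rest ih =>
    have heq : ∀ c, pvEventB level_lcas reconciliation_events c =
        (pvLookupStr reconciliation_events ((pvLookupInt level_lcas c).getD "")).getD "Duplication" := by
      intro c; rfl
    simp only [List.foldl_cons, pvStepA]
    by_cases ha : (pvLookupStr reconciliation_events ((pvLookupInt level_lcas p.1).getD "")).getD "Duplication" = "Duplication" <;>
    by_cases hb : (pvLookupStr reconciliation_events ((pvLookupInt level_lcas p.2).getD "")).getD "Duplication" = "Duplication" <;>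
      simp only [heq, ha, hb, ih, List.filter_cons, List.countP_cons, List.length_cons] <;>
      by_cases hsa : (pvLookupStr reconciliation_events ((pvLookupInt level_lcas p.1).getD "")).getD "Duplication" = "Speciation" <;>
      by_cases hsb : (pvLookupStr reconciliation_events ((pvLookupInt level_lcas p.2).getD "")).getD "Duplication" = "Speciation" <;>
        simp_all <;> omega

-- ===== VERDICT (by name: the statement is the Claim_ definition above) =====
theorem filter_pairs_by_reconciliation_py_spec : Claim_equal_filter_pairs_by_reconciliation_py := by
  intro pairs level_lcas reconciliation_events _ _
  unfold Spec_filter_pairs_by_reconciliation_py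
  unfold filter_pairs_by_reconciliation_py filter_pairs_by_reconciliation_py_alt
  by_cases h0 : reconciliation_events = []
  · simp [h0]
  · simp only [h0, if_false]
    by_cases hm : PySem.Set.inter (PySem.Set.ofList (level_lcas.map Prod.snd)) (PySem.Set.ofList (reconciliation_events.map Prod.fst)) = []
    · simp [hm]
    · simp only [hm, if_false]
      rw [pvLoopA_eq]
      simp
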